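-- pv_equiv track=rewrite | github.com/jcolinpatrick/kryptos | src/kryptos/corpus/normalize.py | reduce_digraphs
-- ===== SOURCE A (Python) =====
-- from typing import Dict, List, Tuple
--
-- DIGRAPH_REDUCTIONS: List[Tuple[str, str]] = [
--     ("KH", "X"),    # Akhenaten → Axenaten (Egyptological ḫ)
--     ("SH", "S"),    # Hatshepsut → Hatsepsut (Egyptological š)
--     ("PH", "F"),    # Pharaoh → Faraoh (Greek-derived)
--     ("DJ", "J"),    # Djehuty → Jehuty (Egyptological ḏ)
--     ("TH", "T"),    # Thothmes → Totmes (careful: affects English "the")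
--     ("CH", "X"),    # Cheops → Xeops (variant rendering of ḫ)
-- ]
--
-- def reduce_digraphs(text: str) -> Tuple[str, List[str]]:
--     """Reduce Egyptological digraphs (KH→X, SH→S, etc.).
--
--     WARNING: changes letter count, shifting all subsequent positions.
--     Operates on uppercase text.
--     """
--     result = text.upper()
--     reductions = []
--     for digraph, replacement in DIGRAPH_REDUCTIONS:
--         count = result.count(digraph)
--         if count:
--             result = result.replace(digraph, replacement)
--             reductions.append(f"{digraph}→{replacement} (x{count})")
--     return result, reductions or ["no digraph changes"]
-- ===== SOURCE B (Python) =====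
-- from typing import Dict, List, Tuple
--
-- DIGRAPH_REDUCTIONS: List[Tuple[str, str]] = [
--     ("KH", "X"),
--     ("SH", "S"),
--     ("PH", "F"),
--     ("DJ", "J"),
--     ("TH", "T"),
--     ("CH", "X"),
-- ]
--
-- def reduce_digraphs(text: str) -> Tuple[str, List[str]]:
--     """Single left-to-right scan: replace digraphs in place, remember the matches."""
--     table = dict(DIGRAPH_REDUCTIONS)
--     t = text.upper()
--     out = []
--     matched = []
--     i = 0
--     n = len(t)
--     while i < n:
--         pair = t[i:i + 2]
--         rep = table.get(pair)
--         if rep is not None: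
--             out.append(rep)
--             matched.append(pair)
--             i += 2
--         else:
--             out.append(t[i])
--             i += 1
--     reductions = [f"{d}\u2192{r} (x{matched.count(d)})"
--                   for d, r in DIGRAPH_REDUCTIONS if d in matched]
--     return "".join(out), reductions or ["no digraph changes"]
-- ===== Notes on version B (the rewrite author's own statement) =====
-- stated objective: alternative
-- what changed: A makes six sequential count-and-replace passes over the whole string (one per digraph); B uppercases once and then does a single left-to-right scan, matching the 2-char window against a digraph table, emitting replacements and recording matches, rebuilding the log from the recorded matches.
import Mathlib
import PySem

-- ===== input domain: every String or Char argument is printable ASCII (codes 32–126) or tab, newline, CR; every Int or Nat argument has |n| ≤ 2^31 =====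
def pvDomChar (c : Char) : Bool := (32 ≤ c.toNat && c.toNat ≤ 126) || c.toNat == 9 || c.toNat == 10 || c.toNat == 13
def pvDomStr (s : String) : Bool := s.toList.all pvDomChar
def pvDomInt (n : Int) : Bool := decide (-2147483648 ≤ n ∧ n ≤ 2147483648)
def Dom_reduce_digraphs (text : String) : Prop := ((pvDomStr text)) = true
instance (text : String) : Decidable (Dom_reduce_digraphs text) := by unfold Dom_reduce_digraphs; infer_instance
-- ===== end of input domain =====

-- B replaces A's six sequential count/replace passes by one left-to-right scan that
-- matches the 2-char window against a digraph table (objective: alternative, one pass).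

-- ===== PORT A =====
def DIGRAPH_REDUCTIONS : List (String × String) :=
  [("KH", "X"), ("SH", "S"), ("PH", "F"), ("DJ", "J"), ("TH", "T"), ("CH", "X")]

-- the body of A's for-loop
def pvStepA (acc : String × List String) (dr : String × String) : String × List String :=
  let count := PySem.Str.count acc.1 dr.1
  if count ≠ 0 then
    (PySem.Str.replace acc.1 dr.1 dr.2,
     acc.2 ++ [dr.1 ++ "→" ++ dr.2 ++ " (x" ++ PySem.Int.toStr (count : Int) ++ ")"])
  else acc

def reduce_digraphs (text : String) : String × List String :=
  let st := DIGRAPH_REDUCTIONS.foldl pvStepA (PySem.Str.upper text, [])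
  (st.1, if st.2.isEmpty then ["no digraph changes"] else st.2)

-- ===== PORT B =====
def pvTable : PySem.Dict String String := PySem.Dict.ofList DIGRAPH_REDUCTIONS

-- the while-loop of Source B: at each index try the 2-char window (1-char at the end)
def pvScan : List Char → List Char × List String
  | [] => ([], [])
  | [c] =>
    match pvTable.get? (String.ofList [c]) with
    | some rep => (rep.toList, [String.ofList [c]])
    | none => ([c], [])
  | a :: b :: t =>
    match pvTable.get? (String.ofList [a, b]) with
    | some rep =>
        let r := pvScan t
        (rep.toList ++ r.1, String.ofList [a, b] :: r.2)
    | none =>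
        let r := pvScan (b :: t)
        (a :: r.1, r.2)
  termination_by l => l.length

def reduce_digraphs_alt (text : String) : String × List String :=
  let s := pvScan (PySem.Str.upper text).toList
  let reductions := (DIGRAPH_REDUCTIONS.filter (fun dr => s.2.contains dr.1)).map
    (fun dr => dr.1 ++ "→" ++ dr.2 ++ " (x" ++ PySem.Int.toStr ((PySem.List.count s.2 dr.1 : Nat) : Int) ++ ")")
  (String.ofList s.1, if reductions.isEmpty then ["no digraph changes"] else reductions)

-- ===== PRECONDITION & SPEC =====
def Spec_reduce_digraphs (text : String) (out : String × List String) : Prop := out = reduce_digraphs_alt text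
instance (text : String) (out : String × List String) : Decidable (Spec_reduce_digraphs text out) := by unfold Spec_reduce_digraphs; infer_instance

-- ===== CLAIM (what is proved, stated in full; the proofs are below) =====
def Claim_equal_reduce_digraphs : Prop := ∀ (text : String), Dom_reduce_digraphs text → Spec_reduce_digraphs text (reduce_digraphs text)

-- ===== LEMMAS AND PROOFS =====

-- Python's non-overlapping count/replace specialised to a 2-char pattern [a,b]
def cnt2 (a b : Char) : List Char → Nat
  | x :: y :: t => if x = a ∧ y = b then cnt2 a b t + 1 else cnt2 a b (y :: t)
  | _ => 0

def rep2 (a b r : Char) : List Char → List Char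
  | x :: y :: t => if x = a ∧ y = b then r :: rep2 a b r t else x :: rep2 a b r (y :: t)
  | l => l

-- the six stages of A's pipeline (on char lists)
def pvSt1 (l : List Char) : List Char := rep2 'K' 'H' 'X' l
def pvSt2 (l : List Char) : List Char := rep2 'S' 'H' 'S' (pvSt1 l)
def pvSt3 (l : List Char) : List Char := rep2 'P' 'H' 'F' (pvSt2 l)
def pvSt4 (l : List Char) : List Char := rep2 'D' 'J' 'J' (pvSt3 l)
def pvSt5 (l : List Char) : List Char := rep2 'T' 'H' 'T' (pvSt4 l)
def pvSt6 (l : List Char) : List Char := rep2 'C' 'H' 'X' (pvSt5 l)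

lemma cnt2_cons2 (a b : Char) (t : List Char) : cnt2 a b (a :: b :: t) = cnt2 a b t + 1 := by
  simp [cnt2]

lemma rep2_cons2 (a b r : Char) (t : List Char) : rep2 a b r (a :: b :: t) = r :: rep2 a b r t := by
  simp [rep2]

lemma cnt2_skip (a b x : Char) (s : List Char) (h : x ≠ a ∨ s.head? ≠ some b) :
    cnt2 a b (x :: s) = cnt2 a b s := by
  cases s with
  | nil => simp [cnt2]
  | cons y t =>
    have : ¬ (x = a ∧ y = b) := by rcases h with h | h <;> simp_all
    simp [cnt2, this]

lemma rep2_skip (a b r x : Char) (s : List Char) (h : x ≠ a ∨ s.head? ≠ some b) :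
    rep2 a b r (x :: s) = x :: rep2 a b r s := by
  cases s with
  | nil => simp [rep2]
  | cons y t =>
    have : ¬ (x = a ∧ y = b) := by rcases h with h | h <;> simp_all
    simp [rep2, this]

lemma rep2_head? (a b r : Char) (s : List Char) :
    (rep2 a b r s).head? = s.head? ∨ (rep2 a b r s).head? = some r := by
  cases s with
  | nil => left; rfl
  | cons x s' =>
    cases s' with
    | nil => left; rfl
    | cons y t =>
      by_cases h : x = a ∧ y = b
      · right; simp [rep2, h]
      · left; simp [rep2, h]

lemma rep2_of_cnt2_zero (a b r : Char) : ∀ (s : List Char), cnt2 a b s = 0 → rep2 a b r s = s := by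
  intro s
  induction s using cnt2.induct a b with
  | case1 x y t hm ih =>
    intro h
    obtain ⟨rfl, rfl⟩ := hm
    simp [cnt2] at h
  | case2 x y t hm ih =>
    intro h
    have h' : cnt2 a b (y :: t) = 0 := by simpa [cnt2, hm] using h
    simp [rep2, hm, ih h']
  | case3 t ht =>
    intro _
    cases t with
    | nil => rfl
    | cons x s' =>
      cases s' with
      | nil => rfl
      | cons y t2 => exact (ht x y t2 rfl).elim

-- bridge: PySem's count/replace on a 2-char pattern are cnt2/rep2
lemma count_go_eq (a b : Char) : ∀ (l : List Char) (fuel : Nat) (acc : Nat), l.length ≤ fuel →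
    PySem.Chars.count.go [a, b] fuel l acc = acc + cnt2 a b l := by
  intro l
  induction l using cnt2.induct a b with
  | case1 x y t hm ih =>
    obtain ⟨rfl, rfl⟩ := hm
    intro fuel acc hf
    cases fuel with
    | zero => simp at hf
    | succ f =>
      rw [PySem.Chars.count.go]
      rw [if_pos (by simp [List.isPrefixOf])]
      have hd : List.drop (List.length [x, y]) (x :: y :: t) = t := by simp
      rw [hd, ih f (acc + 1) (by simp at hf ⊢; omega)]
      simp [cnt2]; omega
  | case2 x y t hm ih =>
    intro fuel acc hf
    cases fuel with
    | zero => simp at hf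
    | succ f =>
      rw [PySem.Chars.count.go]
      rw [if_neg (by simp [List.isPrefixOf]; intro h1 h2; exact hm ⟨h1.symm, h2.symm⟩)]
      rw [ih f acc (by simp at hf ⊢; omega)]
      simp [cnt2, hm]
  | case3 t ht =>
    intro fuel acc hf
    cases t with
    | nil => cases fuel <;> simp [PySem.Chars.count.go, cnt2]
    | cons x s' =>
      cases s' with
      | cons y t2 => exact (ht x y t2 rfl).elim
      | nil =>
        cases fuel with
        | zero => simp at hf
        | succ f =>
          rw [PySem.Chars.count.go]
          rw [if_neg (by simp [List.isPrefixOf])]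
          cases f <;> simp [PySem.Chars.count.go, cnt2]

lemma replace_go_eq (a b r : Char) : ∀ (l : List Char) (fuel : Nat) (acc : List Char), l.length ≤ fuel →
    PySem.Chars.replace.go [a, b] [r] fuel l acc = acc.reverse ++ rep2 a b r l := by
  intro l
  induction l using cnt2.induct a b with
  | case1 x y t hm ih =>
    obtain ⟨rfl, rfl⟩ := hm
    intro fuel acc hf
    cases fuel with
    | zero => simp at hf
    | succ f =>
      rw [PySem.Chars.replace.go]
      rw [if_pos (by simp [List.isPrefixOf])]
      have hd : List.drop (List.length [x, y]) (x :: y :: t) = t := by simp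
      rw [hd, ih f _ (by simp at hf ⊢; omega)]
      simp [rep2]
  | case2 x y t hm ih =>
    intro fuel acc hf
    cases fuel with
    | zero => simp at hf
    | succ f =>
      rw [PySem.Chars.replace.go]
      rw [if_neg (by simp [List.isPrefixOf]; intro h1 h2; exact hm ⟨h1.symm, h2.symm⟩)]
      rw [ih f _ (by simp at hf ⊢; omega)]
      simp [rep2, hm]
  | case3 t ht =>
    intro fuel acc hf
    cases t with
    | nil => cases fuel <;> simp [PySem.Chars.replace.go, rep2]
    | cons x s' =>
      cases s' with
      | cons y t2 => exact (ht x y t2 rfl).elim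
      | nil =>
        cases fuel with
        | zero => simp at hf
        | succ f =>
          rw [PySem.Chars.replace.go]
          rw [if_neg (by simp [List.isPrefixOf])]
          cases f <;> simp [PySem.Chars.replace.go, rep2]

lemma chars_count_eq (a b : Char) (l : List Char) : PySem.Chars.count l [a, b] = cnt2 a b l := by
  simpa [PySem.Chars.count] using count_go_eq a b l l.length 0 le_rfl

lemma chars_replace_eq (a b r : Char) (l : List Char) :
    PySem.Chars.replace l [a, b] [r] = rep2 a b r l := by
  simpa [PySem.Chars.replace] using replace_go_eq a b r l l.length [] le_rfl

-- lookup in the literal table, for a variable 2-char window / 1-char tail window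
lemma pvLookup_pair (a b : Char) : pvTable.get? (String.ofList [a, b]) =
    if a = 'K' ∧ b = 'H' then some "X"
    else if a = 'S' ∧ b = 'H' then some "S"
    else if a = 'P' ∧ b = 'H' then some "F"
    else if a = 'D' ∧ b = 'J' then some "J"
    else if a = 'T' ∧ b = 'H' then some "T"
    else if a = 'C' ∧ b = 'H' then some "X"
    else none := by
  have hmk : pvTable = PySem.Dict.mk
      [("KH", "X"), ("SH", "S"), ("PH", "F"), ("DJ", "J"), ("TH", "T"), ("CH", "X")] := by rfl
  have key : ∀ (c d : Char) (k : String), k.toList = [c, d] →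
      ((k == String.ofList [a, b]) = true ↔ (a = c ∧ b = d)) := by
    intro c d k hk
    rw [beq_iff_eq]
    constructor
    · intro h; have := congrArg String.toList h; rw [hk] at this; simp at this
      exact ⟨this.1.symm, this.2.symm⟩
    · rintro ⟨rfl, rfl⟩
      have : k = String.ofList k.toList := by simp
      rw [this, hk]
  rw [hmk]
  simp only [PySem.Dict.get?_mk_cons]
  rw [show (("KH" : String) == String.ofList [a, b]) = decide (a = 'K' ∧ b = 'H') by
        rcases Bool.eq_false_or_eq_true (("KH" : String) == String.ofList [a, b]) with h | h <;>
          simp [h, (key 'K' 'H' "KH" (by decide)).symm] <;> simp [h] at *,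
      show (("SH" : String) == String.ofList [a, b]) = decide (a = 'S' ∧ b = 'H') by
        rcases Bool.eq_false_or_eq_true (("SH" : String) == String.ofList [a, b]) with h | h <;>
          simp [h, (key 'S' 'H' "SH" (by decide)).symm] <;> simp [h] at *,
      show (("PH" : String) == String.ofList [a, b]) = decide (a = 'P' ∧ b = 'H') by
        rcases Bool.eq_false_or_eq_true (("PH" : String) == String.ofList [a, b]) with h | h <;>
          simp [h, (key 'P' 'H' "PH" (by decide)).symm] <;> simp [h] at *,
      show (("DJ" : String) == String.ofList [a, b]) = decide (a = 'D' ∧ b = 'J') by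
        rcases Bool.eq_false_or_eq_true (("DJ" : String) == String.ofList [a, b]) with h | h <;>
          simp [h, (key 'D' 'J' "DJ" (by decide)).symm] <;> simp [h] at *,
      show (("TH" : String) == String.ofList [a, b]) = decide (a = 'T' ∧ b = 'H') by
        rcases Bool.eq_false_or_eq_true (("TH" : String) == String.ofList [a, b]) with h | h <;>
          simp [h, (key 'T' 'H' "TH" (by decide)).symm] <;> simp [h] at *,
      show (("CH" : String) == String.ofList [a, b]) = decide (a = 'C' ∧ b = 'H') by
        rcases Bool.eq_false_or_eq_true (("CH" : String) == String.ofList [a, b]) with h | h <;>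
          simp [h, (key 'C' 'H' "CH" (by decide)).symm] <;> simp [h] at *]
  split_ifs <;> simp_all [PySem.Dict.get?]

lemma pvLookup_single (c : Char) : pvTable.get? (String.ofList [c]) = none := by
  have hne : ∀ (k : String), k.toList.length = 2 → (k == String.ofList [c]) = false := by
    intro k hk
    rw [beq_eq_false_iff_ne]
    intro h
    have := congrArg String.toList h
    simp at this
    rw [this] at hk
    simp at hk
  have hmk : pvTable = PySem.Dict.mk
      [("KH", "X"), ("SH", "S"), ("PH", "F"), ("DJ", "J"), ("TH", "T"), ("CH", "X")] := by rfl
  rw [hmk]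
  simp only [PySem.Dict.get?_mk_cons,
    hne "KH" (by decide), hne "SH" (by decide), hne "PH" (by decide),
    hne "DJ" (by decide), hne "TH" (by decide), hne "CH" (by decide)]
  simp [PySem.Dict.get?]

-- scan equations
lemma pvScan_nil : pvScan [] = ([], []) := by rw [pvScan]

lemma pvScan_one (c : Char) : pvScan [c] = ([c], []) := by
  rw [pvScan, pvLookup_single]

lemma pvScan_nomatch (a b : Char) (t : List Char)
    (h : pvTable.get? (String.ofList [a, b]) = none) :
    pvScan (a :: b :: t) = (a :: (pvScan (b :: t)).1, (pvScan (b :: t)).2) := by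
  rw [pvScan, h]

lemma pvScan_match (a b : Char) (rep : String) (t : List Char)
    (h : pvTable.get? (String.ofList [a, b]) = some rep) :
    pvScan (a :: b :: t) = (rep.toList ++ (pvScan t).1, String.ofList [a, b] :: (pvScan t).2) := by
  rw [pvScan, h]

-- possible head characters of the staged strings
lemma pvHeads (l : List Char) :
    ((pvSt1 l).head? = l.head? ∨ (pvSt1 l).head? = some 'X')
    ∧ ((pvSt2 l).head? = l.head? ∨ (pvSt2 l).head? = some 'X' ∨ (pvSt2 l).head? = some 'S')
    ∧ ((pvSt3 l).head? = l.head? ∨ (pvSt3 l).head? = some 'X' ∨ (pvSt3 l).head? = some 'S' ∨ (pvSt3 l).head? = some 'F')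
    ∧ ((pvSt4 l).head? = l.head? ∨ (pvSt4 l).head? = some 'X' ∨ (pvSt4 l).head? = some 'S' ∨ (pvSt4 l).head? = some 'F' ∨ (pvSt4 l).head? = some 'J')
    ∧ ((pvSt5 l).head? = l.head? ∨ (pvSt5 l).head? = some 'X' ∨ (pvSt5 l).head? = some 'S' ∨ (pvSt5 l).head? = some 'F' ∨ (pvSt5 l).head? = some 'J' ∨ (pvSt5 l).head? = some 'T') := by
  have h1 : (pvSt1 l).head? = l.head? ∨ (pvSt1 l).head? = some 'X' := rep2_head? 'K' 'H' 'X' l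
  have h2 : (pvSt2 l).head? = (pvSt1 l).head? ∨ (pvSt2 l).head? = some 'S' := rep2_head? 'S' 'H' 'S' (pvSt1 l)
  have h3 : (pvSt3 l).head? = (pvSt2 l).head? ∨ (pvSt3 l).head? = some 'F' := rep2_head? 'P' 'H' 'F' (pvSt2 l)
  have h4 : (pvSt4 l).head? = (pvSt3 l).head? ∨ (pvSt4 l).head? = some 'J' := rep2_head? 'D' 'J' 'J' (pvSt3 l)
  have h5 : (pvSt5 l).head? = (pvSt4 l).head? ∨ (pvSt5 l).head? = some 'T' := rep2_head? 'T' 'H' 'T' (pvSt4 l)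
  have g2 : (pvSt2 l).head? = l.head? ∨ (pvSt2 l).head? = some 'X' ∨ (pvSt2 l).head? = some 'S' := by
    rcases h2 with h | h
    · rcases h1 with h' | h'
      · exact Or.inl (h.trans h')
      · exact Or.inr (Or.inl (h.trans h'))
    · exact Or.inr (Or.inr (h))
  have g3 : (pvSt3 l).head? = l.head? ∨ (pvSt3 l).head? = some 'X' ∨ (pvSt3 l).head? = some 'S' ∨ (pvSt3 l).head? = some 'F' := by
    rcases h3 with h | h
    · rcases g2 with h' | h' | h'
      · exact Or.inl (h.trans h')
      · exact Or.inr (Or.inl (h.trans h'))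
      · exact Or.inr (Or.inr (Or.inl (h.trans h')))
    · exact Or.inr (Or.inr (Or.inr (h)))
  have g4 : (pvSt4 l).head? = l.head? ∨ (pvSt4 l).head? = some 'X' ∨ (pvSt4 l).head? = some 'S' ∨ (pvSt4 l).head? = some 'F' ∨ (pvSt4 l).head? = some 'J' := by
    rcases h4 with h | h
    · rcases g3 with h' | h' | h' | h'
      · exact Or.inl (h.trans h')
      · exact Or.inr (Or.inl (h.trans h'))
      · exact Or.inr (Or.inr (Or.inl (h.trans h')))
      · exact Or.inr (Or.inr (Or.inr (Or.inl (h.trans h'))))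
    · exact Or.inr (Or.inr (Or.inr (Or.inr (h))))
  have g5 : (pvSt5 l).head? = l.head? ∨ (pvSt5 l).head? = some 'X' ∨ (pvSt5 l).head? = some 'S' ∨ (pvSt5 l).head? = some 'F' ∨ (pvSt5 l).head? = some 'J' ∨ (pvSt5 l).head? = some 'T' := by
    rcases h5 with h | h
    · rcases g4 with h' | h' | h' | h' | h'
      · exact Or.inl (h.trans h')
      · exact Or.inr (Or.inl (h.trans h'))
      · exact Or.inr (Or.inr (Or.inl (h.trans h')))
      · exact Or.inr (Or.inr (Or.inr (Or.inl (h.trans h'))))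
      · exact Or.inr (Or.inr (Or.inr (Or.inr (Or.inl (h.trans h')))))
    · exact Or.inr (Or.inr (Or.inr (Or.inr (Or.inr (h)))))
  exact ⟨h1, g2, g3, g4, g5⟩

-- the main invariant: scan output = staged pipeline; per-digraph match counts = A's counts
theorem pvMainAux : ∀ (n : Nat) (l : List Char), l.length ≤ n →
    (pvScan l).1 = pvSt6 l
    ∧ (pvScan l).2.count "KH" = cnt2 'K' 'H' l
    ∧ (pvScan l).2.count "SH" = cnt2 'S' 'H' (pvSt1 l)
    ∧ (pvScan l).2.count "PH" = cnt2 'P' 'H' (pvSt2 l)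
    ∧ (pvScan l).2.count "DJ" = cnt2 'D' 'J' (pvSt3 l)
    ∧ (pvScan l).2.count "TH" = cnt2 'T' 'H' (pvSt4 l)
    ∧ (pvScan l).2.count "CH" = cnt2 'C' 'H' (pvSt5 l)
    := by
  intro n
  induction n with
  | zero =>
    intro l hl
    have hnil : l = [] := List.eq_nil_of_length_eq_zero (Nat.le_zero.mp hl)
    subst hnil
    simp [pvScan_nil, pvSt6, pvSt5, pvSt4, pvSt3, pvSt2, pvSt1, rep2, cnt2]
  | succ n ih =>
    intro l hl
    match l with
    | [] => simp [pvScan_nil, pvSt6, pvSt5, pvSt4, pvSt3, pvSt2, pvSt1, rep2, cnt2]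
    | [c] => simp [pvScan_one, pvSt6, pvSt5, pvSt4, pvSt3, pvSt2, pvSt1, rep2, cnt2]
    | a :: b :: t =>
      by_cases hm1 : a = 'K' ∧ b = 'H'
      · obtain ⟨rfl, rfl⟩ := hm1
        have hlt : t.length ≤ n := by simp only [List.length_cons] at hl; omega
        obtain ⟨IH1, IH2, IH3, IH4, IH5, IH6, IH7⟩ := ih t hlt
        have hlk : pvTable.get? (String.ofList ['K', 'H']) = some "X" := by
          rw [pvLookup_pair]; simp
        rw [pvScan_match 'K' 'H' "X" t hlk]
        have hr : ("X" : String).toList = ['X'] := by decide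
        have hD : String.ofList ['K', 'H'] = ("KH" : String) := by decide
        have s1 : pvSt1 ('K' :: 'H' :: t) = 'X' :: pvSt1 t := by
          rw [pvSt1, rep2_cons2]
          rfl
        have s2 : pvSt2 ('K' :: 'H' :: t) = 'X' :: pvSt2 t := by
          rw [pvSt2, s1, rep2_skip 'S' 'H' 'S' 'X' _ (Or.inl (by decide))]
          rfl
        have s3 : pvSt3 ('K' :: 'H' :: t) = 'X' :: pvSt3 t := by
          rw [pvSt3, s2, rep2_skip 'P' 'H' 'F' 'X' _ (Or.inl (by decide))]
          rfl
        have s4 : pvSt4 ('K' :: 'H' :: t) = 'X' :: pvSt4 t := by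
          rw [pvSt4, s3, rep2_skip 'D' 'J' 'J' 'X' _ (Or.inl (by decide))]
          rfl
        have s5 : pvSt5 ('K' :: 'H' :: t) = 'X' :: pvSt5 t := by
          rw [pvSt5, s4, rep2_skip 'T' 'H' 'T' 'X' _ (Or.inl (by decide))]
          rfl
        have s6 : pvSt6 ('K' :: 'H' :: t) = 'X' :: pvSt6 t := by
          rw [pvSt6, s5, rep2_skip 'C' 'H' 'X' 'X' _ (Or.inl (by decide))]
          rfl
        refine ⟨?_, ?_, ?_, ?_, ?_, ?_, ?_⟩
        · rw [s6, hr, ← IH1]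
          rfl
        · rw [hD, cnt2_cons2]
          simp [List.count_cons, IH2]
        · rw [hD, s1, cnt2_skip 'S' 'H' 'X' _ (Or.inl (by decide))]
          simpa [List.count_cons, (by decide : (("KH" : String) == ("SH" : String)) = false)] using IH3
        · rw [hD, s2, cnt2_skip 'P' 'H' 'X' _ (Or.inl (by decide))]
          simpa [List.count_cons, (by decide : (("KH" : String) == ("PH" : String)) = false)] using IH4
        · rw [hD, s3, cnt2_skip 'D' 'J' 'X' _ (Or.inl (by decide))]
          simpa [List.count_cons, (by decide : (("KH" : String) == ("DJ" : String)) = false)] using IH5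
        · rw [hD, s4, cnt2_skip 'T' 'H' 'X' _ (Or.inl (by decide))]
          simpa [List.count_cons, (by decide : (("KH" : String) == ("TH" : String)) = false)] using IH6
        · rw [hD, s5, cnt2_skip 'C' 'H' 'X' _ (Or.inl (by decide))]
          simpa [List.count_cons, (by decide : (("KH" : String) == ("CH" : String)) = false)] using IH7
      by_cases hm2 : a = 'S' ∧ b = 'H'
      · obtain ⟨rfl, rfl⟩ := hm2
        have hlt : t.length ≤ n := by simp only [List.length_cons] at hl; omega
        obtain ⟨IH1, IH2, IH3, IH4, IH5, IH6, IH7⟩ := ih t hlt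
        have hlk : pvTable.get? (String.ofList ['S', 'H']) = some "S" := by
          rw [pvLookup_pair]; simp
        rw [pvScan_match 'S' 'H' "S" t hlk]
        have hr : ("S" : String).toList = ['S'] := by decide
        have hD : String.ofList ['S', 'H'] = ("SH" : String) := by decide
        have s1 : pvSt1 ('S' :: 'H' :: t) = 'S' :: 'H' :: pvSt1 t := by
          rw [pvSt1, rep2_skip 'K' 'H' 'X' 'S' _ (Or.inl (by decide)), rep2_skip 'K' 'H' 'X' 'H' _ (Or.inl (by decide))]
          rfl
        have s2 : pvSt2 ('S' :: 'H' :: t) = 'S' :: pvSt2 t := by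
          rw [pvSt2, s1, rep2_cons2]
          rfl
        have s3 : pvSt3 ('S' :: 'H' :: t) = 'S' :: pvSt3 t := by
          rw [pvSt3, s2, rep2_skip 'P' 'H' 'F' 'S' _ (Or.inl (by decide))]
          rfl
        have s4 : pvSt4 ('S' :: 'H' :: t) = 'S' :: pvSt4 t := by
          rw [pvSt4, s3, rep2_skip 'D' 'J' 'J' 'S' _ (Or.inl (by decide))]
          rfl
        have s5 : pvSt5 ('S' :: 'H' :: t) = 'S' :: pvSt5 t := by
          rw [pvSt5, s4, rep2_skip 'T' 'H' 'T' 'S' _ (Or.inl (by decide))]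
          rfl
        have s6 : pvSt6 ('S' :: 'H' :: t) = 'S' :: pvSt6 t := by
          rw [pvSt6, s5, rep2_skip 'C' 'H' 'X' 'S' _ (Or.inl (by decide))]
          rfl
        refine ⟨?_, ?_, ?_, ?_, ?_, ?_, ?_⟩
        · rw [s6, hr, ← IH1]
          rfl
        · rw [hD, cnt2_skip 'K' 'H' 'S' _ (Or.inl (by decide)), cnt2_skip 'K' 'H' 'H' _ (Or.inl (by decide))]
          simpa [List.count_cons, (by decide : (("SH" : String) == ("KH" : String)) = false)] using IH2
        · rw [hD, s1, cnt2_cons2]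
          simp [List.count_cons, IH3]
        · rw [hD, s2, cnt2_skip 'P' 'H' 'S' _ (Or.inl (by decide))]
          simpa [List.count_cons, (by decide : (("SH" : String) == ("PH" : String)) = false)] using IH4
        · rw [hD, s3, cnt2_skip 'D' 'J' 'S' _ (Or.inl (by decide))]
          simpa [List.count_cons, (by decide : (("SH" : String) == ("DJ" : String)) = false)] using IH5
        · rw [hD, s4, cnt2_skip 'T' 'H' 'S' _ (Or.inl (by decide))]
          simpa [List.count_cons, (by decide : (("SH" : String) == ("TH" : String)) = false)] using IH6
        · rw [hD, s5, cnt2_skip 'C' 'H' 'S' _ (Or.inl (by decide))]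
          simpa [List.count_cons, (by decide : (("SH" : String) == ("CH" : String)) = false)] using IH7
      by_cases hm3 : a = 'P' ∧ b = 'H'
      · obtain ⟨rfl, rfl⟩ := hm3
        have hlt : t.length ≤ n := by simp only [List.length_cons] at hl; omega
        obtain ⟨IH1, IH2, IH3, IH4, IH5, IH6, IH7⟩ := ih t hlt
        have hlk : pvTable.get? (String.ofList ['P', 'H']) = some "F" := by
          rw [pvLookup_pair]; simp
        rw [pvScan_match 'P' 'H' "F" t hlk]
        have hr : ("F" : String).toList = ['F'] := by decide
        have hD : String.ofList ['P', 'H'] = ("PH" : String) := by decide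
        have s1 : pvSt1 ('P' :: 'H' :: t) = 'P' :: 'H' :: pvSt1 t := by
          rw [pvSt1, rep2_skip 'K' 'H' 'X' 'P' _ (Or.inl (by decide)), rep2_skip 'K' 'H' 'X' 'H' _ (Or.inl (by decide))]
          rfl
        have s2 : pvSt2 ('P' :: 'H' :: t) = 'P' :: 'H' :: pvSt2 t := by
          rw [pvSt2, s1, rep2_skip 'S' 'H' 'S' 'P' _ (Or.inl (by decide)), rep2_skip 'S' 'H' 'S' 'H' _ (Or.inl (by decide))]
          rfl
        have s3 : pvSt3 ('P' :: 'H' :: t) = 'F' :: pvSt3 t := by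
          rw [pvSt3, s2, rep2_cons2]
          rfl
        have s4 : pvSt4 ('P' :: 'H' :: t) = 'F' :: pvSt4 t := by
          rw [pvSt4, s3, rep2_skip 'D' 'J' 'J' 'F' _ (Or.inl (by decide))]
          rfl
        have s5 : pvSt5 ('P' :: 'H' :: t) = 'F' :: pvSt5 t := by
          rw [pvSt5, s4, rep2_skip 'T' 'H' 'T' 'F' _ (Or.inl (by decide))]
          rfl
        have s6 : pvSt6 ('P' :: 'H' :: t) = 'F' :: pvSt6 t := by
          rw [pvSt6, s5, rep2_skip 'C' 'H' 'X' 'F' _ (Or.inl (by decide))]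
          rfl
        refine ⟨?_, ?_, ?_, ?_, ?_, ?_, ?_⟩
        · rw [s6, hr, ← IH1]
          rfl
        · rw [hD, cnt2_skip 'K' 'H' 'P' _ (Or.inl (by decide)), cnt2_skip 'K' 'H' 'H' _ (Or.inl (by decide))]
          simpa [List.count_cons, (by decide : (("PH" : String) == ("KH" : String)) = false)] using IH2
        · rw [hD, s1, cnt2_skip 'S' 'H' 'P' _ (Or.inl (by decide)), cnt2_skip 'S' 'H' 'H' _ (Or.inl (by decide))]
          simpa [List.count_cons, (by decide : (("PH" : String) == ("SH" : String)) = false)] using IH3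
        · rw [hD, s2, cnt2_cons2]
          simp [List.count_cons, IH4]
        · rw [hD, s3, cnt2_skip 'D' 'J' 'F' _ (Or.inl (by decide))]
          simpa [List.count_cons, (by decide : (("PH" : String) == ("DJ" : String)) = false)] using IH5
        · rw [hD, s4, cnt2_skip 'T' 'H' 'F' _ (Or.inl (by decide))]
          simpa [List.count_cons, (by decide : (("PH" : String) == ("TH" : String)) = false)] using IH6
        · rw [hD, s5, cnt2_skip 'C' 'H' 'F' _ (Or.inl (by decide))]
          simpa [List.count_cons, (by decide : (("PH" : String) == ("CH" : String)) = false)] using IH7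
      by_cases hm4 : a = 'D' ∧ b = 'J'
      · obtain ⟨rfl, rfl⟩ := hm4
        have hlt : t.length ≤ n := by simp only [List.length_cons] at hl; omega
        obtain ⟨IH1, IH2, IH3, IH4, IH5, IH6, IH7⟩ := ih t hlt
        have hlk : pvTable.get? (String.ofList ['D', 'J']) = some "J" := by
          rw [pvLookup_pair]; simp
        rw [pvScan_match 'D' 'J' "J" t hlk]
        have hr : ("J" : String).toList = ['J'] := by decide
        have hD : String.ofList ['D', 'J'] = ("DJ" : String) := by decide
        have s1 : pvSt1 ('D' :: 'J' :: t) = 'D' :: 'J' :: pvSt1 t := by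
          rw [pvSt1, rep2_skip 'K' 'H' 'X' 'D' _ (Or.inl (by decide)), rep2_skip 'K' 'H' 'X' 'J' _ (Or.inl (by decide))]
          rfl
        have s2 : pvSt2 ('D' :: 'J' :: t) = 'D' :: 'J' :: pvSt2 t := by
          rw [pvSt2, s1, rep2_skip 'S' 'H' 'S' 'D' _ (Or.inl (by decide)), rep2_skip 'S' 'H' 'S' 'J' _ (Or.inl (by decide))]
          rfl
        have s3 : pvSt3 ('D' :: 'J' :: t) = 'D' :: 'J' :: pvSt3 t := by
          rw [pvSt3, s2, rep2_skip 'P' 'H' 'F' 'D' _ (Or.inl (by decide)), rep2_skip 'P' 'H' 'F' 'J' _ (Or.inl (by decide))]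
          rfl
        have s4 : pvSt4 ('D' :: 'J' :: t) = 'J' :: pvSt4 t := by
          rw [pvSt4, s3, rep2_cons2]
          rfl
        have s5 : pvSt5 ('D' :: 'J' :: t) = 'J' :: pvSt5 t := by
          rw [pvSt5, s4, rep2_skip 'T' 'H' 'T' 'J' _ (Or.inl (by decide))]
          rfl
        have s6 : pvSt6 ('D' :: 'J' :: t) = 'J' :: pvSt6 t := by
          rw [pvSt6, s5, rep2_skip 'C' 'H' 'X' 'J' _ (Or.inl (by decide))]
          rfl
        refine ⟨?_, ?_, ?_, ?_, ?_, ?_, ?_⟩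
        · rw [s6, hr, ← IH1]
          rfl
        · rw [hD, cnt2_skip 'K' 'H' 'D' _ (Or.inl (by decide)), cnt2_skip 'K' 'H' 'J' _ (Or.inl (by decide))]
          simpa [List.count_cons, (by decide : (("DJ" : String) == ("KH" : String)) = false)] using IH2
        · rw [hD, s1, cnt2_skip 'S' 'H' 'D' _ (Or.inl (by decide)), cnt2_skip 'S' 'H' 'J' _ (Or.inl (by decide))]
          simpa [List.count_cons, (by decide : (("DJ" : String) == ("SH" : String)) = false)] using IH3
        · rw [hD, s2, cnt2_skip 'P' 'H' 'D' _ (Or.inl (by decide)), cnt2_skip 'P' 'H' 'J' _ (Or.inl (by decide))]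
          simpa [List.count_cons, (by decide : (("DJ" : String) == ("PH" : String)) = false)] using IH4
        · rw [hD, s3, cnt2_cons2]
          simp [List.count_cons, IH5]
        · rw [hD, s4, cnt2_skip 'T' 'H' 'J' _ (Or.inl (by decide))]
          simpa [List.count_cons, (by decide : (("DJ" : String) == ("TH" : String)) = false)] using IH6
        · rw [hD, s5, cnt2_skip 'C' 'H' 'J' _ (Or.inl (by decide))]
          simpa [List.count_cons, (by decide : (("DJ" : String) == ("CH" : String)) = false)] using IH7
      by_cases hm5 : a = 'T' ∧ b = 'H'
      · obtain ⟨rfl, rfl⟩ := hm5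
        have hlt : t.length ≤ n := by simp only [List.length_cons] at hl; omega
        obtain ⟨IH1, IH2, IH3, IH4, IH5, IH6, IH7⟩ := ih t hlt
        have hlk : pvTable.get? (String.ofList ['T', 'H']) = some "T" := by
          rw [pvLookup_pair]; simp
        rw [pvScan_match 'T' 'H' "T" t hlk]
        have hr : ("T" : String).toList = ['T'] := by decide
        have hD : String.ofList ['T', 'H'] = ("TH" : String) := by decide
        have s1 : pvSt1 ('T' :: 'H' :: t) = 'T' :: 'H' :: pvSt1 t := by
          rw [pvSt1, rep2_skip 'K' 'H' 'X' 'T' _ (Or.inl (by decide)), rep2_skip 'K' 'H' 'X' 'H' _ (Or.inl (by decide))]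
          rfl
        have s2 : pvSt2 ('T' :: 'H' :: t) = 'T' :: 'H' :: pvSt2 t := by
          rw [pvSt2, s1, rep2_skip 'S' 'H' 'S' 'T' _ (Or.inl (by decide)), rep2_skip 'S' 'H' 'S' 'H' _ (Or.inl (by decide))]
          rfl
        have s3 : pvSt3 ('T' :: 'H' :: t) = 'T' :: 'H' :: pvSt3 t := by
          rw [pvSt3, s2, rep2_skip 'P' 'H' 'F' 'T' _ (Or.inl (by decide)), rep2_skip 'P' 'H' 'F' 'H' _ (Or.inl (by decide))]
          rfl
        have s4 : pvSt4 ('T' :: 'H' :: t) = 'T' :: 'H' :: pvSt4 t := by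
          rw [pvSt4, s3, rep2_skip 'D' 'J' 'J' 'T' _ (Or.inl (by decide)), rep2_skip 'D' 'J' 'J' 'H' _ (Or.inl (by decide))]
          rfl
        have s5 : pvSt5 ('T' :: 'H' :: t) = 'T' :: pvSt5 t := by
          rw [pvSt5, s4, rep2_cons2]
          rfl
        have s6 : pvSt6 ('T' :: 'H' :: t) = 'T' :: pvSt6 t := by
          rw [pvSt6, s5, rep2_skip 'C' 'H' 'X' 'T' _ (Or.inl (by decide))]
          rfl
        refine ⟨?_, ?_, ?_, ?_, ?_, ?_, ?_⟩
        · rw [s6, hr, ← IH1]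
          rfl
        · rw [hD, cnt2_skip 'K' 'H' 'T' _ (Or.inl (by decide)), cnt2_skip 'K' 'H' 'H' _ (Or.inl (by decide))]
          simpa [List.count_cons, (by decide : (("TH" : String) == ("KH" : String)) = false)] using IH2
        · rw [hD, s1, cnt2_skip 'S' 'H' 'T' _ (Or.inl (by decide)), cnt2_skip 'S' 'H' 'H' _ (Or.inl (by decide))]
          simpa [List.count_cons, (by decide : (("TH" : String) == ("SH" : String)) = false)] using IH3
        · rw [hD, s2, cnt2_skip 'P' 'H' 'T' _ (Or.inl (by decide)), cnt2_skip 'P' 'H' 'H' _ (Or.inl (by decide))]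
          simpa [List.count_cons, (by decide : (("TH" : String) == ("PH" : String)) = false)] using IH4
        · rw [hD, s3, cnt2_skip 'D' 'J' 'T' _ (Or.inl (by decide)), cnt2_skip 'D' 'J' 'H' _ (Or.inl (by decide))]
          simpa [List.count_cons, (by decide : (("TH" : String) == ("DJ" : String)) = false)] using IH5
        · rw [hD, s4, cnt2_cons2]
          simp [List.count_cons, IH6]
        · rw [hD, s5, cnt2_skip 'C' 'H' 'T' _ (Or.inl (by decide))]
          simpa [List.count_cons, (by decide : (("TH" : String) == ("CH" : String)) = false)] using IH7
      by_cases hm6 : a = 'C' ∧ b = 'H'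
      · obtain ⟨rfl, rfl⟩ := hm6
        have hlt : t.length ≤ n := by simp only [List.length_cons] at hl; omega
        obtain ⟨IH1, IH2, IH3, IH4, IH5, IH6, IH7⟩ := ih t hlt
        have hlk : pvTable.get? (String.ofList ['C', 'H']) = some "X" := by
          rw [pvLookup_pair]; simp
        rw [pvScan_match 'C' 'H' "X" t hlk]
        have hr : ("X" : String).toList = ['X'] := by decide
        have hD : String.ofList ['C', 'H'] = ("CH" : String) := by decide
        have s1 : pvSt1 ('C' :: 'H' :: t) = 'C' :: 'H' :: pvSt1 t := by
          rw [pvSt1, rep2_skip 'K' 'H' 'X' 'C' _ (Or.inl (by decide)), rep2_skip 'K' 'H' 'X' 'H' _ (Or.inl (by decide))]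
          rfl
        have s2 : pvSt2 ('C' :: 'H' :: t) = 'C' :: 'H' :: pvSt2 t := by
          rw [pvSt2, s1, rep2_skip 'S' 'H' 'S' 'C' _ (Or.inl (by decide)), rep2_skip 'S' 'H' 'S' 'H' _ (Or.inl (by decide))]
          rfl
        have s3 : pvSt3 ('C' :: 'H' :: t) = 'C' :: 'H' :: pvSt3 t := by
          rw [pvSt3, s2, rep2_skip 'P' 'H' 'F' 'C' _ (Or.inl (by decide)), rep2_skip 'P' 'H' 'F' 'H' _ (Or.inl (by decide))]
          rfl
        have s4 : pvSt4 ('C' :: 'H' :: t) = 'C' :: 'H' :: pvSt4 t := by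
          rw [pvSt4, s3, rep2_skip 'D' 'J' 'J' 'C' _ (Or.inl (by decide)), rep2_skip 'D' 'J' 'J' 'H' _ (Or.inl (by decide))]
          rfl
        have s5 : pvSt5 ('C' :: 'H' :: t) = 'C' :: 'H' :: pvSt5 t := by
          rw [pvSt5, s4, rep2_skip 'T' 'H' 'T' 'C' _ (Or.inl (by decide)), rep2_skip 'T' 'H' 'T' 'H' _ (Or.inl (by decide))]
          rfl
        have s6 : pvSt6 ('C' :: 'H' :: t) = 'X' :: pvSt6 t := by
          rw [pvSt6, s5, rep2_cons2]
          rfl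
        refine ⟨?_, ?_, ?_, ?_, ?_, ?_, ?_⟩
        · rw [s6, hr, ← IH1]
          rfl
        · rw [hD, cnt2_skip 'K' 'H' 'C' _ (Or.inl (by decide)), cnt2_skip 'K' 'H' 'H' _ (Or.inl (by decide))]
          simpa [List.count_cons, (by decide : (("CH" : String) == ("KH" : String)) = false)] using IH2
        · rw [hD, s1, cnt2_skip 'S' 'H' 'C' _ (Or.inl (by decide)), cnt2_skip 'S' 'H' 'H' _ (Or.inl (by decide))]
          simpa [List.count_cons, (by decide : (("CH" : String) == ("SH" : String)) = false)] using IH3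
        · rw [hD, s2, cnt2_skip 'P' 'H' 'C' _ (Or.inl (by decide)), cnt2_skip 'P' 'H' 'H' _ (Or.inl (by decide))]
          simpa [List.count_cons, (by decide : (("CH" : String) == ("PH" : String)) = false)] using IH4
        · rw [hD, s3, cnt2_skip 'D' 'J' 'C' _ (Or.inl (by decide)), cnt2_skip 'D' 'J' 'H' _ (Or.inl (by decide))]
          simpa [List.count_cons, (by decide : (("CH" : String) == ("DJ" : String)) = false)] using IH5
        · rw [hD, s4, cnt2_skip 'T' 'H' 'C' _ (Or.inl (by decide)), cnt2_skip 'T' 'H' 'H' _ (Or.inl (by decide))]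
          simpa [List.count_cons, (by decide : (("CH" : String) == ("TH" : String)) = false)] using IH6
        · rw [hD, s5, cnt2_cons2]
          simp [List.count_cons, IH7]
      · have hlb : (b :: t).length ≤ n := by simp only [List.length_cons] at hl ⊢; omega
        obtain ⟨IH1, IH2, IH3, IH4, IH5, IH6, IH7⟩ := ih (b :: t) hlb
        have hlk : pvTable.get? (String.ofList [a, b]) = none := by
          rw [pvLookup_pair]
          simp [hm1, hm2, hm3, hm4, hm5, hm6]
        rw [pvScan_nomatch a b t hlk]
        obtain ⟨H1, H2, H3, H4, H5⟩ := pvHeads (b :: t)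
        have c1 : a ≠ 'K' ∨ (b :: t).head? ≠ some 'H' := by
          by_cases ha : a = 'K'
          · subst ha
            have hb : b ≠ 'H' := fun hb => hm1 ⟨rfl, hb⟩
            right
            simp [hb]
          · exact Or.inl ha
        have c2 : a ≠ 'S' ∨ (pvSt1 (b :: t)).head? ≠ some 'H' := by
          by_cases ha : a = 'S'
          · subst ha
            have hb : b ≠ 'H' := fun hb => hm2 ⟨rfl, hb⟩
            right
            rcases H1 with h | h
            · rw [h]; simp [hb]
            · rw [h]; simp
          · exact Or.inl ha
        have c3 : a ≠ 'P' ∨ (pvSt2 (b :: t)).head? ≠ some 'H' := by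
          by_cases ha : a = 'P'
          · subst ha
            have hb : b ≠ 'H' := fun hb => hm3 ⟨rfl, hb⟩
            right
            rcases H2 with h | h | h
            · rw [h]; simp [hb]
            · rw [h]; simp
            · rw [h]; simp
          · exact Or.inl ha
        have c4 : a ≠ 'D' ∨ (pvSt3 (b :: t)).head? ≠ some 'J' := by
          by_cases ha : a = 'D'
          · subst ha
            have hb : b ≠ 'J' := fun hb => hm4 ⟨rfl, hb⟩
            right
            rcases H3 with h | h | h | h
            · rw [h]; simp [hb]
            · rw [h]; simp
            · rw [h]; simp
            · rw [h]; simp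
          · exact Or.inl ha
        have c5 : a ≠ 'T' ∨ (pvSt4 (b :: t)).head? ≠ some 'H' := by
          by_cases ha : a = 'T'
          · subst ha
            have hb : b ≠ 'H' := fun hb => hm5 ⟨rfl, hb⟩
            right
            rcases H4 with h | h | h | h | h
            · rw [h]; simp [hb]
            · rw [h]; simp
            · rw [h]; simp
            · rw [h]; simp
            · rw [h]; simp
          · exact Or.inl ha
        have c6 : a ≠ 'C' ∨ (pvSt5 (b :: t)).head? ≠ some 'H' := by
          by_cases ha : a = 'C'
          · subst ha
            have hb : b ≠ 'H' := fun hb => hm6 ⟨rfl, hb⟩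
            right
            rcases H5 with h | h | h | h | h | h
            · rw [h]; simp [hb]
            · rw [h]; simp
            · rw [h]; simp
            · rw [h]; simp
            · rw [h]; simp
            · rw [h]; simp
          · exact Or.inl ha
        have t1 : pvSt1 (a :: b :: t) = a :: pvSt1 (b :: t) := by
          rw [pvSt1, rep2_skip 'K' 'H' 'X' a _ c1]
          rfl
        have t2 : pvSt2 (a :: b :: t) = a :: pvSt2 (b :: t) := by
          rw [pvSt2, t1, rep2_skip 'S' 'H' 'S' a _ c2]
          rfl
        have t3 : pvSt3 (a :: b :: t) = a :: pvSt3 (b :: t) := by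
          rw [pvSt3, t2, rep2_skip 'P' 'H' 'F' a _ c3]
          rfl
        have t4 : pvSt4 (a :: b :: t) = a :: pvSt4 (b :: t) := by
          rw [pvSt4, t3, rep2_skip 'D' 'J' 'J' a _ c4]
          rfl
        have t5 : pvSt5 (a :: b :: t) = a :: pvSt5 (b :: t) := by
          rw [pvSt5, t4, rep2_skip 'T' 'H' 'T' a _ c5]
          rfl
        have t6 : pvSt6 (a :: b :: t) = a :: pvSt6 (b :: t) := by
          rw [pvSt6, t5, rep2_skip 'C' 'H' 'X' a _ c6]
          rfl
        refine ⟨?_, ?_, ?_, ?_, ?_, ?_, ?_⟩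
        · rw [t6, IH1]
        · rw [cnt2_skip 'K' 'H' a _ c1]
          exact IH2
        · rw [t1, cnt2_skip 'S' 'H' a _ c2]
          exact IH3
        · rw [t2, cnt2_skip 'P' 'H' a _ c3]
          exact IH4
        · rw [t3, cnt2_skip 'D' 'J' a _ c4]
          exact IH5
        · rw [t4, cnt2_skip 'T' 'H' a _ c5]
          exact IH6
        · rw [t5, cnt2_skip 'C' 'H' a _ c6]
          exact IH7

lemma pvStepA_eq (a b r : Char) (dR rR : String) (hd : dR.toList = [a, b]) (hr : rR.toList = [r])
    (s : List Char) (logs : List String) :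
    pvStepA (String.ofList s, logs) (dR, rR)
    = (String.ofList (rep2 a b r s),
       logs ++ (if cnt2 a b s ≠ 0 then
         [dR ++ "→" ++ rR ++ " (x" ++ PySem.Int.toStr ((cnt2 a b s : Nat) : Int) ++ ")"] else [])) := by
  have hc : PySem.Chars.count s dR.toList = cnt2 a b s := by
    rw [hd]; exact chars_count_eq a b s
  have hrep : PySem.Chars.replace s dR.toList rR.toList = rep2 a b r s := by
    rw [hd, hr]; exact chars_replace_eq a b r s
  unfold pvStepA
  by_cases h0 : cnt2 a b s = 0
  · simp [PySem.Str.count, PySem.Str.replace, hc, h0, rep2_of_cnt2_zero a b r s h0]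
  · simp [PySem.Str.count, PySem.Str.replace, hc, hrep, h0]

lemma contains_eq_count_ne (l : List String) (x : String) :
    l.contains x = decide (l.count x ≠ 0) := by
  by_cases h : x ∈ l
  · simp [h, Nat.pos_iff_ne_zero.mp (List.count_pos_iff.mpr h)]
  · simp [h, List.count_eq_zero.mpr (by simpa using h)]

lemma map_ite {α β : Type} (f : α → β) (p : Prop) [Decidable p] (a b : List α) :
    List.map f (if p then a else b) = if p then List.map f a else List.map f b := apply_ite _ _ _ _
lemma ite_append {α : Type} (p : Prop) [Decidable p] (a b R : List α) :
    (if p then a else b) ++ R = if p then a ++ R else b ++ R := apply_ite (· ++ R) _ _ _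
set_option maxHeartbeats 2000000 in
lemma pvFinal (u : List Char) :
    ((List.foldl pvStepA (String.ofList u, ([] : List String)) [("KH","X"),("SH","S"),("PH","F"),("DJ","J"),("TH","T"),("CH","X")]).1,
     if (List.foldl pvStepA (String.ofList u, ([] : List String)) [("KH","X"),("SH","S"),("PH","F"),("DJ","J"),("TH","T"),("CH","X")]).2.isEmpty then ["no digraph changes"] else (List.foldl pvStepA (String.ofList u, ([] : List String)) [("KH","X"),("SH","S"),("PH","F"),("DJ","J"),("TH","T"),("CH","X")]).2)
    = ((String.ofList (pvScan ((String.ofList u).toList)).1),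
       if (([("KH","X"),("SH","S"),("PH","F"),("DJ","J"),("TH","T"),("CH","X")].filter (fun dr => (pvScan ((String.ofList u).toList)).2.contains dr.1)).map (fun dr => dr.1 ++ "→" ++ dr.2 ++ " (x" ++ PySem.Int.toStr ((PySem.List.count (pvScan ((String.ofList u).toList)).2 dr.1 : Nat) : Int) ++ ")")).isEmpty then ["no digraph changes"] else (([("KH","X"),("SH","S"),("PH","F"),("DJ","J"),("TH","T"),("CH","X")].filter (fun dr => (pvScan ((String.ofList u).toList)).2.contains dr.1)).map (fun dr => dr.1 ++ "→" ++ dr.2 ++ " (x" ++ PySem.Int.toStr ((PySem.List.count (pvScan ((String.ofList u).toList)).2 dr.1 : Nat) : Int) ++ ")"))) := by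
  obtain ⟨E1, E2, E3, E4, E5, E6, E7⟩ := pvMainAux u.length u le_rfl
  simp only [pvSt6, pvSt5, pvSt4, pvSt3, pvSt2, pvSt1] at E1 E2 E3 E4 E5 E6 E7
  have hfold : List.foldl pvStepA (String.ofList u, ([] : List String)) [("KH","X"),("SH","S"),("PH","F"),("DJ","J"),("TH","T"),("CH","X")] = (String.ofList (rep2 'C' 'H' 'X' (rep2 'T' 'H' 'T' (rep2 'D' 'J' 'J' (rep2 'P' 'H' 'F' (rep2 'S' 'H' 'S' (rep2 'K' 'H' 'X' (u))))))), ((((((([] : List String) ++ (if cnt2 'K' 'H' (u) ≠ 0 then ["KH" ++ "→" ++ "X" ++ " (x" ++ PySem.Int.toStr ((cnt2 'K' 'H' (u) : Nat) : Int) ++ ")"] else [])) ++ (if cnt2 'S' 'H' (rep2 'K' 'H' 'X' (u)) ≠ 0 then ["SH" ++ "→" ++ "S" ++ " (x" ++ PySem.Int.toStr ((cnt2 'S' 'H' (rep2 'K' 'H' 'X' (u)) : Nat) : Int) ++ ")"] else [])) ++ (if cnt2 'P' 'H' (rep2 'S' 'H' 'S' (rep2 'K' 'H' 'X' (u))) ≠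 0 then ["PH" ++ "→" ++ "F" ++ " (x" ++ PySem.Int.toStr ((cnt2 'P' 'H' (rep2 'S' 'H' 'S' (rep2 'K' 'H' 'X' (u))) : Nat) : Int) ++ ")"] else [])) ++ (if cnt2 'D' 'J' (rep2 'P' 'H' 'F' (rep2 'S' 'H' 'S' (rep2 'K' 'H' 'X' (u)))) ≠ 0 then ["DJ" ++ "→" ++ "J" ++ " (x" ++ PySem.Int.toStr ((cnt2 'D' 'J' (rep2 'P' 'H' 'F' (rep2 'S' 'H' 'S' (rep2 'K' 'H' 'X' (u)))) : Nat) : Int) ++ ")"] else [])) ++ (if cnt2 'T' 'H' (rep2 'D' 'J' 'J' (rep2 'P' 'H' 'F' (rep2 'S' 'H' 'S' (rep2 'K' 'H' 'X' (u))))) ≠ 0 then ["TH" ++ "→" ++ "T" ++ " (x" ++ PySem.Int.toStr ((cnt2 'T' 'H' (rep2 'D' 'J' 'J' (rep2 'P' 'H' 'F' (rep2 'S' 'H' 'S' (rep2 'K' 'H' 'X' (u))))) : Nat) : Int) ++ ")"] else [])) ++ (if cnt2 'C' 'H' (rep2 'T' 'H' 'T' (rep2 'D' 'J' 'J' (rep2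 'P' 'H' 'F' (rep2 'S' 'H' 'S' (rep2 'K' 'H' 'X' (u)))))) ≠ 0 then ["CH" ++ "→" ++ "X" ++ " (x" ++ PySem.Int.toStr ((cnt2 'C' 'H' (rep2 'T' 'H' 'T' (rep2 'D' 'J' 'J' (rep2 'P' 'H' 'F' (rep2 'S' 'H' 'S' (rep2 'K' 'H' 'X' (u)))))) : Nat) : Int) ++ ")"] else []))) := by
    rw [List.foldl_cons,
        pvStepA_eq 'K' 'H' 'X' "KH" "X" (by decide) (by decide) (u) _,
        List.foldl_cons,
        pvStepA_eq 'S' 'H' 'S' "SH" "S" (by decide) (by decide) (rep2 'K' 'H' 'X' (u)) _,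
        List.foldl_cons,
        pvStepA_eq 'P' 'H' 'F' "PH" "F" (by decide) (by decide) (rep2 'S' 'H' 'S' (rep2 'K' 'H' 'X' (u))) _,
        List.foldl_cons,
        pvStepA_eq 'D' 'J' 'J' "DJ" "J" (by decide) (by decide) (rep2 'P' 'H' 'F' (rep2 'S' 'H' 'S' (rep2 'K' 'H' 'X' (u)))) _,
        List.foldl_cons,
        pvStepA_eq 'T' 'H' 'T' "TH" "T" (by decide) (by decide) (rep2 'D' 'J' 'J' (rep2 'P' 'H' 'F' (rep2 'S' 'H' 'S' (rep2 'K' 'H' 'X' (u))))) _,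
        List.foldl_cons,
        pvStepA_eq 'C' 'H' 'X' "CH" "X" (by decide) (by decide) (rep2 'T' 'H' 'T' (rep2 'D' 'J' 'J' (rep2 'P' 'H' 'F' (rep2 'S' 'H' 'S' (rep2 'K' 'H' 'X' (u)))))) _,
        List.foldl_nil]
  rw [String.toList_ofList]
  rw [hfold]
  have b1 : (pvScan u).2.contains "KH" = decide (cnt2 'K' 'H' (u) ≠ 0) := by
    rw [contains_eq_count_ne]
    exact decide_eq_decide.mpr (by rw [E2])
  have b2 : (pvScan u).2.contains "SH" = decide (cnt2 'S' 'H' (rep2 'K' 'H' 'X' (u)) ≠ 0) := by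
    rw [contains_eq_count_ne]
    exact decide_eq_decide.mpr (by rw [E3])
  have b3 : (pvScan u).2.contains "PH" = decide (cnt2 'P' 'H' (rep2 'S' 'H' 'S' (rep2 'K' 'H' 'X' (u))) ≠ 0) := by
    rw [contains_eq_count_ne]
    exact decide_eq_decide.mpr (by rw [E4])
  have b4 : (pvScan u).2.contains "DJ" = decide (cnt2 'D' 'J' (rep2 'P' 'H' 'F' (rep2 'S' 'H' 'S' (rep2 'K' 'H' 'X' (u)))) ≠ 0) := by
    rw [contains_eq_count_ne]
    exact decide_eq_decide.mpr (by rw [E5])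
  have b5 : (pvScan u).2.contains "TH" = decide (cnt2 'T' 'H' (rep2 'D' 'J' 'J' (rep2 'P' 'H' 'F' (rep2 'S' 'H' 'S' (rep2 'K' 'H' 'X' (u))))) ≠ 0) := by
    rw [contains_eq_count_ne]
    exact decide_eq_decide.mpr (by rw [E6])
  have b6 : (pvScan u).2.contains "CH" = decide (cnt2 'C' 'H' (rep2 'T' 'H' 'T' (rep2 'D' 'J' 'J' (rep2 'P' 'H' 'F' (rep2 'S' 'H' 'S' (rep2 'K' 'H' 'X' (u)))))) ≠ 0) := by
    rw [contains_eq_count_ne]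
    exact decide_eq_decide.mpr (by rw [E7])
  simp only [List.filter_cons, List.filter_nil, b1, b2, b3, b4, b5, b6, decide_eq_true_eq,
    map_ite, List.map_cons, List.map_nil, PySem.List.count_eq,
    E1, E2, E3, E4, E5, E6, E7, ite_append, List.cons_append, List.nil_append]

-- ===== VERDICT (by name: the statement is the Claim_ definition above) =====
theorem reduce_digraphs_spec : Claim_equal_reduce_digraphs := by
  intro text _
  exact pvFinal (PySem.Chars.upper text.toList)
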